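-- pv_equiv track=rewrite | github.com/pypi-data/pypi-mirror-375 | packages/plotext-plus/plotext_plus-1.0.10-py3-none-any.whl/plotext_plus/_utility.py | get_fill_boundaries
-- ===== SOURCE A (Python) =====
-- def transpose(data, length=1):  # it needs no explanation
--     return [[]] * length if data == [] else list(map(list, zip(*data, strict=False)))
--
-- def get_fill_boundaries(x, y):
--     xm = []
--     x_length = len(x)
--     for i in range(x_length):
--         xi, yi = x[i], y[i]
--         indices = [j for j in range(x_length) if x[j] == xi and y[j] < yi]
--         y_values = [y[j] for j in indices]
--         m = min(y_values, default=yi)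
--         xm.append([x[i], m])
--     x, m = transpose(xm)
--     return m
-- ===== SOURCE B (Python) =====
-- def get_fill_boundaries(x, y):
--     mins = {}
--     for xi, yi in zip(x, y):
--         if xi not in mins or yi < mins[xi]:
--             mins[xi] = yi
--     return [mins[xi] for xi in x]
-- ===== Notes on version B (the rewrite author's own statement) =====
-- stated objective: faster
-- what changed: Replaces the per-point quadratic scan (for each i, rescan all points with the same x and y below y_i, then a list-based transpose) with one pass that records the minimum y per x in a dict, then a direct lookup per point; the min of same-x strictly-smaller y's with default y_i is exactly the per-x group minimum.
import Mathlib
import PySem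

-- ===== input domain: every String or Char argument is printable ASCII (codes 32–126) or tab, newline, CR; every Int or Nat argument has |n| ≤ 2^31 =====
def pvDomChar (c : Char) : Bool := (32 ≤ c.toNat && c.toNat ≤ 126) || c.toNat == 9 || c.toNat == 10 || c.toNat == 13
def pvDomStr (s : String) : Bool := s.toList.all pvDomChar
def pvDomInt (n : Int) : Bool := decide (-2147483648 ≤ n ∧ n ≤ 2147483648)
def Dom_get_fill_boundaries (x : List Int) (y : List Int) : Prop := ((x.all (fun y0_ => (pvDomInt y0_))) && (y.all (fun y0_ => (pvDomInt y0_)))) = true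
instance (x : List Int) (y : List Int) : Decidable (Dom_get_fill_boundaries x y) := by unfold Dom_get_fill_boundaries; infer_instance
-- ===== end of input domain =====

-- B replaces A's per-point rescan of all same-x points (plus a transpose) by a single
-- pass building a per-x minimum-y dict and one lookup per point (objective: faster).

-- ===== PORT A =====
-- zip(*data, strict=False): peel off one column at a time, stopping at the shortest row
def tzipA : List (List Int) → List (List Int)
  | [] => []
  | r :: rs =>
    if h : r.isEmpty || rs.any (·.isEmpty) then []
    else (r.headD 0 :: rs.map (·.headD 0)) :: tzipA (r.tail :: rs.map (·.tail))
termination_by l => (l.headD []).length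
decreasing_by
  simp only [List.headD_cons]
  have : r ≠ [] := by simp at h; intro hr; simp [hr, List.isEmpty] at h
  cases r with
  | nil => exact absurd rfl this
  | cons a t => simp

def transposeA (data : List (List Int)) : List (List Int) :=
  if data = [] then [[]] else tzipA data

def get_fill_boundaries (x : List Int) (y : List Int) : List Int :=
  let xlen : Int := (x.length : Int)
  let xm : List (List Int) := (PySem.List.pyRange 0 xlen 1).foldl (fun xm i =>
    let xi := PySem.List.pyGetD x i 0
    let yi := PySem.List.pyGetD y i 0
    let indices := (PySem.List.pyRange 0 xlen 1).filter
      (fun j => PySem.List.pyGetD x j 0 == xi && decide (PySem.List.pyGetD y j 0 < yi))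
    let y_values := indices.map (fun j => PySem.List.pyGetD y j 0)
    let m := (PySem.List.min? y_values (fun a => a)).getD yi
    xm ++ [[xi, m]]) []
  match transposeA xm with
  | [_, m] => m
  | _ => []   -- Python's 'x, m = transpose(xm)' raises here (only when x = []); excluded by Pre_

-- ===== PORT B =====
def bStep (d : PySem.Dict Int Int) (p : Int × Int) : PySem.Dict Int Int :=
  if (d.get? p.1).isNone || p.2 < (d.get? p.1).getD 0 then d.insert p.1 p.2 else d

def get_fill_boundaries_alt (x : List Int) (y : List Int) : List Int :=
  let mins := (x.zip y).foldl bStep PySem.Dict.empty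
  x.map (fun xi => (mins.get? xi).getD 0)   -- mins[xi]: KeyError impossible under Pre_

-- ===== PRECONDITION & SPEC =====
-- A raises ValueError when x = [] (unpacking transpose([]) = [[]]) and IndexError when
-- len(x) > len(y); Pre_ excludes exactly those inputs.
def Pre_get_fill_boundaries (x : List Int) (y : List Int) : Prop :=
  x ≠ [] ∧ x.length ≤ y.length
instance (x : List Int) (y : List Int) : Decidable (Pre_get_fill_boundaries x y) := by
  unfold Pre_get_fill_boundaries; infer_instance

def pvWitness_get_fill_boundaries : List Int × List Int := ([1, 2, 1, 2], [5, 3, 2, 7])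


def Spec_get_fill_boundaries (x : List Int) (y : List Int) (out : List Int) : Prop :=
  out = get_fill_boundaries_alt x y
instance (x : List Int) (y : List Int) (out : List Int) : Decidable (Spec_get_fill_boundaries x y out) := by
  unfold Spec_get_fill_boundaries; infer_instance

-- ===== CLAIM (what is proved, stated in full; the proofs are below) =====
def Claim_equal_get_fill_boundaries : Prop := ∀ (x : List Int) (y : List Int), Dom_get_fill_boundaries x y → Pre_get_fill_boundaries x y → Spec_get_fill_boundaries x y (get_fill_boundaries x y)

-- ===== LEMMAS AND PROOFS =====

-- values of the pairs in ps whose key is v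
def keyVals (ps : List (Int × Int)) (v : Int) : List Int :=
  (ps.filter (fun p => p.1 == v)).map (·.2)

def omin (o : Option Int) (n : Int) : Option Int := some (min (o.getD n) n)

theorem foldl_bStep_get? (ps : List (Int × Int)) (d : PySem.Dict Int Int) (v : Int) :
    (ps.foldl bStep d).get? v = (keyVals ps v).foldl omin (d.get? v) := by
  induction ps generalizing d with
  | nil => rfl
  | cons p t ih =>
    simp only [List.foldl_cons, ih, keyVals, List.filter_cons]
    by_cases hv : p.1 = v
    · simp only [hv, beq_self_eq_true, if_pos, List.map_cons, List.foldl_cons]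
      congr 1
      simp only [bStep, PySem.Dict.get?_insert, hv]
      rcases hd : d.get? v with _ | m
      · simp [omin, hd]
      · simp only [hd, Option.isNone_some, Bool.false_or, Option.getD_some, omin]
        by_cases hlt : p.2 < m
        · simp [hlt, PySem.Dict.get?_insert, min_eq_right (le_of_lt hlt)]
        · simp [hlt, hd, min_eq_left (le_of_not_gt hlt)]
    · have : (p.1 == v) = false := by simp [hv]
      simp only [this, Bool.false_eq_true, if_neg, not_false_iff]
      congr 1
      simp only [bStep]
      split
      · simp [PySem.Dict.get?_insert, Ne.symm hv]
      · rfl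

theorem foldl_omin_some (t : List Int) (m : Int) :
    t.foldl omin (some m) = some (t.foldl min m) := by
  induction t generalizing m with
  | nil => rfl
  | cons a t ih => simp [omin, ih]

theorem foldl_min_mem (t : List Int) (a : Int) : t.foldl min a ∈ a :: t := by
  induction t generalizing a with
  | nil => simp
  | cons b t ih =>
    have h := ih (min a b)
    rw [List.mem_cons] at h
    rcases h with h | h
    · rw [List.foldl_cons, h]
      rcases min_choice a b with hm | hm <;> simp [hm]
    · exact List.mem_cons_of_mem _ (List.mem_cons_of_mem _ h)

theorem foldl_min_le (t : List Int) : ∀ (a : Int), ∀ z ∈ a :: t, t.foldl min a ≤ z := by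
  induction t with
  | nil => intro a z hz; rw [List.mem_cons] at hz; simp at hz; simp [hz]
  | cons b t ih =>
    intro a z hz
    rw [List.mem_cons] at hz
    rcases hz with hz | hz
    · rw [hz]; exact le_trans (ih (min a b) _ List.mem_cons_self) (min_le_left a b)
    · rw [List.mem_cons] at hz
      rcases hz with hz | hz
      · rw [hz]; exact le_trans (ih (min a b) _ List.mem_cons_self) (min_le_right a b)
      · exact ih (min a b) z (List.mem_cons_of_mem _ hz)

-- the A-side min over strictly-smaller same-x values, defaulted to yv, IS the group min
theorem min_filter_lt (L : List Int) (yv : Int) (hy : yv ∈ L) :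
    (PySem.List.min? (L.filter (fun z => decide (z < yv))) (fun a => a)).getD yv
      = (L.foldl omin none).getD 0 := by
  rcases L with _ | ⟨a, t⟩
  · simp at hy
  · simp only [List.foldl_cons, omin, Option.getD_none, min_self, foldl_omin_some,
      Option.getD_some]
    set m := t.foldl min a with hm
    have hmem : m ∈ a :: t := foldl_min_mem t a
    have hle : ∀ z ∈ a :: t, m ≤ z := foldl_min_le t a
    rcases hf : (a :: t).filter (fun z => decide (z < yv)) with _ | ⟨c, tf⟩
    · -- no smaller element: the minimum is yv itself
      have hall := List.filter_eq_nil_iff.mp hf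
      have h1 : ¬ m < yv := by simpa using hall m hmem
      have h2 : m ≤ yv := hle yv hy
      simp [PySem.List.min?, le_antisymm h2 (le_of_not_gt h1)]
    · rw [PySem.List.min?_id_cons]
      simp only [Option.getD_some]
      set mf := tf.foldl min c with hmf
      have hsub : ∀ z ∈ c :: tf, z ∈ a :: t ∧ z < yv := by
        intro z hz
        have : z ∈ (a :: t).filter (fun z => decide (z < yv)) := by rw [hf]; exact hz
        simpa using List.mem_filter.mp this
      have hmf_mem := foldl_min_mem tf c
      have h1 : m ≤ mf := hle mf (hsub mf hmf_mem).1
      have h2 : m < yv := lt_of_le_of_lt h1 (hsub mf hmf_mem).2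
      have hmem_f : m ∈ c :: tf := by
        have : m ∈ (a :: t).filter (fun z => decide (z < yv)) :=
          List.mem_filter.mpr ⟨hmem, by simpa using h2⟩
        rw [hf] at this; exact this
      exact le_antisymm (foldl_min_le tf c m hmem_f) h1

-- transpose of a nonempty list of two-element rows
theorem tzipA_pairs (l : List (Int × Int)) (hl : l ≠ []) :
    tzipA (l.map (fun p => [p.1, p.2])) = [l.map (·.1), l.map (·.2)] := by
  rcases l with _ | ⟨p, t⟩
  · exact absurd rfl hl
  · rw [List.map_cons, tzipA, dif_neg (by simp [Function.comp])]
    simp only [List.headD_cons, List.tail_cons, List.map_map, Function.comp_def]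
    rw [tzipA, dif_neg (by simp [Function.comp])]
    simp only [List.headD_cons, List.tail_cons, List.map_map, Function.comp_def]
    rw [tzipA, dif_pos (by simp)]
    simp

-- list built by a range comprehension over getD
theorem map_range_getD {α β : Type} [Inhabited α] (x : List α) (f : α → β) (d : α) :
    (List.range x.length).map (fun k => f (x.getD k d)) = x.map f := by
  induction x with
  | nil => simp
  | cons a t ih =>
    rw [List.length_cons, List.range_succ_eq_map]
    simp only [List.map_cons, List.getD_cons_zero, List.map_map, Function.comp_def,
      List.getD_cons_succ]
    rw [ih]

-- index-based filtered scan = zip-based filtered scan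
theorem range_filter_zip (x y : List Int) (h : x.length ≤ y.length) (P : Int → Int → Bool) :
    ((List.range x.length).filter (fun j => P (x.getD j 0) (y.getD j 0))).map
        (fun j => y.getD j 0)
      = ((x.zip y).filter (fun p => P p.1 p.2)).map (·.2) := by
  induction x generalizing y with
  | nil => simp
  | cons a t ih =>
    rcases y with _ | ⟨b, u⟩
    · simp at h
    · have hlen : t.length ≤ u.length := by simpa using h
      rw [List.length_cons, List.range_succ_eq_map]
      simp only [List.filter_cons, List.getD_cons_zero, List.zip_cons_cons]
      rw [List.filter_map]
      simp only [Function.comp_def, List.getD_cons_succ]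
      by_cases hP : P a b = true
      · rw [if_pos hP, if_pos hP]
        simp only [List.map_cons, List.map_map, Function.comp_def, List.getD_cons_zero,
          List.getD_cons_succ]
        rw [ih u hlen]
      · rw [if_neg hP, if_neg hP]
        rw [List.map_map]
        simp only [Function.comp_def, List.getD_cons_succ]
        rw [ih u hlen]

-- extracting the second column of A's transpose of two-element rows
theorem transposeA_snd (l : List Int) (f g : Int → Int) (hl : l ≠ []) :
    (match transposeA (l.map (fun i => [f i, g i])) with
     | [_, m] => m | _ => []) = l.map g := by
  have h1 : l.map (fun i => [f i, g i])
      = (l.map (fun i => (f i, g i))).map (fun p => [p.1, p.2]) := by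
    rw [List.map_map]; rfl
  have h2 : l.map (fun i => (f i, g i)) ≠ [] := by simpa using hl
  rw [h1]
  unfold transposeA
  rw [if_neg (by simpa using h2), tzipA_pairs _ h2]
  show (l.map (fun i => (f i, g i))).map (·.2) = l.map g
  rw [List.map_map]; rfl

theorem B_eq (x y : List Int) :
    get_fill_boundaries_alt x y
      = (List.range x.length).map
          (fun k => ((keyVals (x.zip y) (x.getD k 0)).foldl omin none).getD 0) := by
  show x.map (fun xi => ((((x.zip y).foldl bStep PySem.Dict.empty).get? xi).getD 0)) = _
  rw [← map_range_getD x
    (fun xi => (((x.zip y).foldl bStep PySem.Dict.empty).get? xi).getD 0) 0]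
  refine List.map_congr_left fun k _ => ?_
  rw [foldl_bStep_get?, PySem.Dict.get?_empty]

theorem A_eq (x y : List Int) (hne : x ≠ []) (hlen : x.length ≤ y.length) :
    get_fill_boundaries x y
      = (List.range x.length).map
          (fun k => ((keyVals (x.zip y) (x.getD k 0)).foldl omin none).getD 0) := by
  simp only [get_fill_boundaries]
  rw [PySem.List.foldl_append_singleton_eq_map, List.nil_append]
  have hR : PySem.List.pyRange 0 (x.length : Int) 1 ≠ [] := by
    simp only [PySem.List.pyRange_one, sub_zero, Int.toNat_natCast, ne_eq,
      List.map_eq_nil_iff, List.range_eq_nil]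
    exact fun h => hne (List.length_eq_zero_iff.mp h)
  rw [transposeA_snd _ _ _ hR]
  rw [PySem.List.pyRange_one, List.map_map]
  simp only [Function.comp_def, sub_zero, Int.toNat_natCast, zero_add]
  refine List.map_congr_left fun k hk => ?_
  have hk' : k < x.length := List.mem_range.mp hk
  have hky : k < y.length := lt_of_lt_of_le hk' hlen
  simp only [PySem.List.pyGetD_natCast]
  rw [List.filter_map, List.map_map]
  simp only [Function.comp_def, PySem.List.pyGetD_natCast]
  rw [range_filter_zip x y hlen (fun u v => u == x.getD k 0 && decide (v < y.getD k 0))]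
  have hsplit : ((x.zip y).filter
        (fun p => p.1 == x.getD k 0 && decide (p.2 < y.getD k 0))).map (·.2)
      = (keyVals (x.zip y) (x.getD k 0)).filter (fun z => decide (z < y.getD k 0)) := by
    unfold keyVals
    rw [List.filter_map, List.filter_filter]
    congr 1
    exact List.filter_congr fun p _ => by simp [Bool.and_comm]
  rw [hsplit]
  have hmem : y.getD k 0 ∈ keyVals (x.zip y) (x.getD k 0) := by
    unfold keyVals
    refine List.mem_map.mpr ⟨(x.getD k 0, y.getD k 0), ?_, rfl⟩
    refine List.mem_filter.mpr ⟨?_, by simp⟩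
    have hzlen : k < (x.zip y).length := by rw [List.length_zip]; omega
    rw [List.getD_eq_getElem x 0 hk', List.getD_eq_getElem y 0 hky]
    have h := List.getElem_mem hzlen
    rwa [List.getElem_zip] at h
  exact min_filter_lt _ _ hmem

-- ===== VERDICT (by name: the statement is the Claim_ definition above) =====
theorem get_fill_boundaries_spec : Claim_equal_get_fill_boundaries := by
  intro x y _ hpre
  obtain ⟨hne, hlen⟩ := hpre
  unfold Spec_get_fill_boundaries
  rw [A_eq x y hne hlen, B_eq]
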